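-- pv_equiv track=rewrite | github.com/SamirGiri197/Zip_Solver-with_LLM | src/core/generator.py | _create_display_grid
-- ===== SOURCE A (Python) =====
-- from typing import List, Tuple, Dict, Set, Optional
--
-- def _create_display_grid(grid: List[List[int]], clue_indices: Set[int]) -> Tuple[List[List[int]], Dict[int, int]]:
--     n = len(grid)
--     display_grid = [[0] * n for _ in range(n)]
--     mapping = {actual: i + 1 for i, actual in enumerate(sorted(clue_indices))}
--     for r in range(n):
--         for c in range(n):
--             val = grid[r][c]
--             if val in mapping:
--                 display_grid[r][c] = mapping[val]
--     return display_grid, mapping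
-- ===== SOURCE B (Python) =====
-- from typing import List, Tuple, Dict, Set
--
-- def _create_display_grid(grid: List[List[int]], clue_indices: Set[int]) -> Tuple[List[List[int]], Dict[int, int]]:
--     n = len(grid)
--     # one pass over the grid: value -> list of positions holding it
--     pos: Dict[int, List[Tuple[int, int]]] = {}
--     for r in range(n):
--         for c in range(n):
--             pos.setdefault(grid[r][c], []).append((r, c))
--     display_grid = [[0] * n for _ in range(n)]
--     mapping: Dict[int, int] = {}
--     for i, actual in enumerate(sorted(clue_indices)):
--         mapping[actual] = i + 1
--         for (r, c) in pos.get(actual, []):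
--             display_grid[r][c] = i + 1
--     return display_grid, mapping
-- ===== Notes on version B (the rewrite author's own statement) =====
-- stated objective: alternative
-- what changed: B inverts the control flow: one pass over the grid builds a value->positions index, and the write phase is driven by enumerate(sorted(clue_indices)), writing rank i+1 into the recorded positions of each clue value, instead of A's per-cell membership test against the mapping.
import Mathlib
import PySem

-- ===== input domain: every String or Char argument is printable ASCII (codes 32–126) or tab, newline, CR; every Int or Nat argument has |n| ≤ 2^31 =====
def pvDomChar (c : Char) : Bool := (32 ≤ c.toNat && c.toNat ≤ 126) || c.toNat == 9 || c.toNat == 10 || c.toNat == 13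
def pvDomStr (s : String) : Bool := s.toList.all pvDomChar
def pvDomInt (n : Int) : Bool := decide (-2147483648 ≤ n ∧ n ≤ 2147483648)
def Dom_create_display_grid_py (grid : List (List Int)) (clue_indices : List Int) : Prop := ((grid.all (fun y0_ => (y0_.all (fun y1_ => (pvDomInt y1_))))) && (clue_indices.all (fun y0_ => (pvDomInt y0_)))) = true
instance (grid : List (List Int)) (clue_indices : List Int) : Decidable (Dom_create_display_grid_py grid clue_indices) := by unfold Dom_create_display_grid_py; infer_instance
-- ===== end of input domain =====

-- B re-implements the relabelling with an inverted index (value -> positions) and a write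
-- phase driven by the sorted clue values; equivalence of the RETURN value with A is proved below.

-- shared cell-assignment helper: display[r][c] = v
def pvSet2d (g : List (List Int)) (r c : Nat) (v : Int) : List (List Int) :=
  g.set r ((g.getD r []).set c v)

-- ===== PORT A =====
def create_display_grid_py (grid : List (List Int)) (clue_indices : List Int) : List (List Int) × (List (Int × Int)) :=
  let n : Nat := grid.length
  let display0 : List (List Int) := List.replicate n (List.replicate n 0)
  let mapping : PySem.Dict Int Int :=
    (PySem.List.enumerate (PySem.List.sorted (PySem.Set.ofList clue_indices) (fun x => x) false)).foldl
      (fun d p => d.insert p.2 (p.1 + 1)) PySem.Dict.empty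
  let display :=
    (PySem.List.pyRange 0 (n : Int) 1).foldl (fun dg r =>
      (PySem.List.pyRange 0 (n : Int) 1).foldl (fun dg c =>
        match mapping.get? ((grid.getD r.toNat []).getD c.toNat 0) with
        | some m => pvSet2d dg r.toNat c.toNat m
        | none => dg) dg) display0
  (display, mapping.items)

-- ===== PORT B =====
def create_display_grid_py_alt (grid : List (List Int)) (clue_indices : List Int) : List (List Int) × (List (Int × Int)) :=
  let n : Nat := grid.length
  let pos : PySem.Dict Int (List (Int × Int)) :=
    (PySem.List.pyRange 0 (n : Int) 1).foldl (fun d r =>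
      (PySem.List.pyRange 0 (n : Int) 1).foldl (fun d c =>
        d.modify ((grid.getD r.toNat []).getD c.toNat 0) [] (fun l => l ++ [(r, c)])) d)
      PySem.Dict.empty
  let display0 : List (List Int) := List.replicate n (List.replicate n 0)
  let st :=
    (PySem.List.enumerate (PySem.List.sorted (PySem.Set.ofList clue_indices) (fun x => x) false)).foldl
      (fun (st : List (List Int) × PySem.Dict Int Int) p =>
        ((pos.getD p.2 []).foldl (fun dg rc => pvSet2d dg rc.1.toNat rc.2.toNat (p.1 + 1)) st.1,
         st.2.insert p.2 (p.1 + 1)))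
      (display0, PySem.Dict.empty)
  (st.1, st.2.items)

-- ===== PRECONDITION & SPEC =====
-- Pre_ excludes grids with a row shorter than len(grid): there Python A (and B) raises IndexError.
def Pre_create_display_grid_py (grid : List (List Int)) (clue_indices : List Int) : Prop :=
  ∀ row ∈ grid, grid.length ≤ row.length
instance (grid : List (List Int)) (clue_indices : List Int) : Decidable (Pre_create_display_grid_py grid clue_indices) := by unfold Pre_create_display_grid_py; infer_instance
def pvWitness_create_display_grid_py : List (List Int) × List Int := ([[9, 2], [3, 9]], [3, 2])

def Spec_create_display_grid_py (grid : List (List Int)) (clue_indices : List Int) (out : List (List Int) × (List (Int × Int))) : Prop := out = create_display_grid_py_alt grid clue_indices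
instance (grid : List (List Int)) (clue_indices : List Int) (out : List (List Int) × (List (Int × Int))) : Decidable (Spec_create_display_grid_py grid clue_indices out) := by unfold Spec_create_display_grid_py; infer_instance

-- ===== CLAIM (what is proved, stated in full; the proofs are below) =====
def Claim_equal_create_display_grid_py : Prop := ∀ (grid : List (List Int)) (clue_indices : List Int), Dom_create_display_grid_py grid clue_indices → Pre_create_display_grid_py grid clue_indices → Spec_create_display_grid_py grid clue_indices (create_display_grid_py grid clue_indices)

-- ===== LEMMAS AND PROOFS =====

-- the cell read display[r][c] (0 outside)
def pvGet2 (g : List (List Int)) (r c : Nat) : Int := (g.getD r []).getD c 0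

-- a batch of cell assignments
def pvWrites (ops : List (Nat × Nat × Int)) (g : List (List Int)) : List (List Int) :=
  ops.foldl (fun g o => pvSet2d g o.1 o.2.1 o.2.2) g

-- the assignments A performs, in A's order
def pvOpsA (grid : List (List Int)) (mapping : PySem.Dict Int Int) (n : Nat) : List (Nat × Nat × Int) :=
  (PySem.List.pyRange 0 (n : Int) 1).flatMap (fun r =>
    (PySem.List.pyRange 0 (n : Int) 1).flatMap (fun c =>
      match mapping.get? ((grid.getD r.toNat []).getD c.toNat 0) with
      | some m => [(r.toNat, c.toNat, m)]
      | none => []))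

-- the assignments B performs, in B's order
def pvOpsB (pos : PySem.Dict Int (List (Int × Int))) (svals : List Int) : List (Nat × Nat × Int) :=
  (PySem.List.enumerate svals).flatMap (fun p =>
    (pos.getD p.2 []).map (fun rc => (rc.1.toNat, rc.2.toNat, p.1 + 1)))

theorem length_pvSet2d (g : List (List Int)) (r c : Nat) (v : Int) :
    (pvSet2d g r c v).length = g.length := by
  simp [pvSet2d]

theorem rowlen_pvSet2d (g : List (List Int)) (r c : Nat) (v : Int) (i : Nat) :
    ((pvSet2d g r c v).getD i []).length = (g.getD i []).length := by
  unfold pvSet2d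
  by_cases hr : r < g.length
  · by_cases h : i = r
    · subst h
      rw [List.getD_eq_getElem?_getD, List.getElem?_set_self (by simpa using hr),
          List.getD_eq_getElem?_getD]
      simp
    · rw [List.getD_eq_getElem?_getD, List.getElem?_set_ne (fun e => h e.symm),
          List.getD_eq_getElem?_getD]
  · rw [List.set_eq_of_length_le (by omega)]

theorem pvGet2_pvSet2d_self (g : List (List Int)) (r c : Nat) (v : Int)
    (hr : r < g.length) (hc : c < (g.getD r []).length) :
    pvGet2 (pvSet2d g r c v) r c = v := by
  simp only [pvGet2, pvSet2d, List.getD_eq_getElem?_getD]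
  rw [List.getElem?_set_self (by simpa using hr)]
  simp only [Option.getD_some]
  rw [List.getElem?_set_self (by simpa [List.getD_eq_getElem?_getD] using hc)]
  rfl

theorem pvGet2_pvSet2d_ne (g : List (List Int)) (r c : Nat) (v : Int) (r' c' : Nat)
    (h : r' ≠ r ∨ c' ≠ c) :
    pvGet2 (pvSet2d g r c v) r' c' = pvGet2 g r' c' := by
  simp only [pvGet2, pvSet2d, List.getD_eq_getElem?_getD]
  rcases h with h | h
  · rw [List.getElem?_set_ne (fun e => h e.symm)]
  · by_cases hr : r < g.length
    · by_cases hi : r' = r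
      · subst hi
        rw [List.getElem?_set_self (by simpa using hr), Option.getD_some,
            List.getElem?_set_ne (fun e => h e.symm)]
      · rw [List.getElem?_set_ne (fun e => hi e.symm)]
    · rw [List.set_eq_of_length_le (by omega)]

theorem length_pvWrites (ops : List (Nat × Nat × Int)) (g : List (List Int)) :
    (pvWrites ops g).length = g.length := by
  induction ops generalizing g with
  | nil => rfl
  | cons o t ih => simp [pvWrites, List.foldl_cons] at *; rw [ih, length_pvSet2d]

theorem rowlen_pvWrites (ops : List (Nat × Nat × Int)) (g : List (List Int)) (i : Nat) :
    ((pvWrites ops g).getD i []).length = (g.getD i []).length := by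
  induction ops generalizing g with
  | nil => rfl
  | cons o t ih => simp only [pvWrites, List.foldl_cons] at *; rw [ih, rowlen_pvSet2d]

theorem pvGet2_pvWrites_none (ops : List (Nat × Nat × Int)) (g : List (List Int)) (r c : Nat)
    (h : ∀ o ∈ ops, o.1 ≠ r ∨ o.2.1 ≠ c) :
    pvGet2 (pvWrites ops g) r c = pvGet2 g r c := by
  induction ops generalizing g with
  | nil => rfl
  | cons o t ih =>
    simp only [pvWrites, List.foldl_cons] at *
    rw [ih _ (fun o ho => h o (List.mem_cons_of_mem _ ho)),
        pvGet2_pvSet2d_ne _ _ _ _ _ _ ?_]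
    rcases h o (List.mem_cons_self) with h1 | h1
    · exact Or.inl (fun e => h1 e.symm)
    · exact Or.inr (fun e => h1 e.symm)

theorem pvGet2_pvWrites_mem (ops : List (Nat × Nat × Int)) (g : List (List Int)) (r c : Nat) (v : Int)
    (hmem : (r, c, v) ∈ ops)
    (huniq : ∀ o ∈ ops, o.1 = r → o.2.1 = c → o.2.2 = v)
    (hr : r < g.length) (hc : c < (g.getD r []).length) :
    pvGet2 (pvWrites ops g) r c = v := by
  induction ops generalizing g with
  | nil => simp at hmem
  | cons o t ih =>
    simp only [pvWrites, List.foldl_cons] at *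
    by_cases h1 : o.1 = r ∧ o.2.1 = c
    · have hv : o.2.2 = v := huniq o List.mem_cons_self h1.1 h1.2
      by_cases h2 : ∀ o' ∈ t, o'.1 ≠ r ∨ o'.2.1 ≠ c
      · rw [show (List.foldl (fun g o => pvSet2d g o.1 o.2.1 o.2.2) (pvSet2d g o.1 o.2.1 o.2.2) t)
              = pvWrites t (pvSet2d g o.1 o.2.1 o.2.2) from rfl,
            pvGet2_pvWrites_none t _ r c h2, h1.1, h1.2, hv]
        exact pvGet2_pvSet2d_self g r c v hr hc
      · push_neg at h2
        obtain ⟨o', ho', e1, e2⟩ := h2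
        have hv' : o'.2.2 = v := huniq o' (List.mem_cons_of_mem _ ho') e1 e2
        have hmem' : (r, c, v) ∈ t := by
          have : o' = (r, c, v) := by
            obtain ⟨a, b, w⟩ := o'
            simp_all
          exact this ▸ ho'
        exact ih _ hmem' (fun o'' ho'' => huniq o'' (List.mem_cons_of_mem _ ho''))
          (by rw [length_pvSet2d]; exact hr) (by rw [rowlen_pvSet2d]; exact hc)
    · have hmem' : (r, c, v) ∈ t := by
        rcases List.mem_cons.1 hmem with h | h
        · exfalso; apply h1; rw [← h]; exact ⟨rfl, rfl⟩
        · exact h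
      exact ih _ hmem' (fun o'' ho'' => huniq o'' (List.mem_cons_of_mem _ ho''))
        (by rw [length_pvSet2d]; exact hr) (by rw [rowlen_pvSet2d]; exact hc)

-- A's display loop is pvWrites of pvOpsA
theorem A_display_eq (grid : List (List Int)) (mapping : PySem.Dict Int Int) (n : Nat)
    (g0 : List (List Int)) :
    (PySem.List.pyRange 0 (n : Int) 1).foldl (fun dg r =>
      (PySem.List.pyRange 0 (n : Int) 1).foldl (fun dg c =>
        match mapping.get? ((grid.getD r.toNat []).getD c.toNat 0) with
        | some m => pvSet2d dg r.toNat c.toNat m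
        | none => dg) dg) g0
    = pvWrites (pvOpsA grid mapping n) g0 := by
  unfold pvWrites pvOpsA
  rw [List.foldl_flatMap]
  congr 1
  funext dg r
  rw [List.foldl_flatMap]
  congr 1
  funext dg c
  rcases hq : mapping.get? ((grid.getD r.toNat []).getD c.toNat 0) with _ | m <;>
    simp

-- membership in pvOpsA
theorem mem_pvOpsA (grid : List (List Int)) (mapping : PySem.Dict Int Int) (n : Nat)
    (o : Nat × Nat × Int) :
    o ∈ pvOpsA grid mapping n ↔
      o.1 < n ∧ o.2.1 < n ∧ mapping.get? (pvGet2 grid o.1 o.2.1) = some o.2.2 := by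
  unfold pvOpsA
  simp only [List.mem_flatMap, PySem.List.mem_pyRange_one]
  constructor
  · rintro ⟨ri, ⟨hr0, hrn⟩, ci, ⟨hc0, hcn⟩, hmem⟩
    rcases hq : mapping.get? ((grid.getD ri.toNat []).getD ci.toNat 0) with _ | m <;>
      rw [hq] at hmem <;> simp at hmem
    subst hmem
    refine ⟨by simp; omega, by simp; omega, ?_⟩
    simpa [pvGet2] using hq
  · rintro ⟨h1, h2, h3⟩
    refine ⟨(o.1 : Int), ⟨by omega, by omega⟩, (o.2.1 : Int), ⟨by omega, by omega⟩, ?_⟩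
    simp only [Int.toNat_natCast]
    rw [show (grid.getD o.1 []).getD o.2.1 0 = pvGet2 grid o.1 o.2.1 from rfl, h3]
    simp

-- the lookup table A's dict comprehension builds, characterised
theorem pvMapping_get? (svals : List Int) (hnd : svals.Nodup) (a m : Int) :
    ((PySem.List.enumerate svals).foldl (fun d p => d.insert p.2 (p.1 + 1))
        (PySem.Dict.empty : PySem.Dict Int Int)).get? a = some m
    ↔ ∃ (k : Nat) (_ : k < svals.length), svals[k] = a ∧ m = (k : Int) + 1 := by
  have hitems : ((PySem.List.enumerate svals).foldl (fun d p => d.insert p.2 (p.1 + 1))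
      (PySem.Dict.empty : PySem.Dict Int Int)).items
      = (PySem.List.enumerate svals).map (fun p => (p.2, p.1 + 1)) := by
    rw [PySem.Dict.items_foldl_insert_fresh (PySem.List.enumerate svals)
        (fun p => p.2) (fun p => p.1 + 1) PySem.Dict.empty
        (fun p _ => PySem.Dict.contains_empty p.2)
        (by rw [PySem.List.map_snd_enumerate]; exact hnd)]
    rfl
  have hkeys : ((PySem.List.enumerate svals).foldl (fun d p => d.insert p.2 (p.1 + 1))
      (PySem.Dict.empty : PySem.Dict Int Int)).keys = svals := by
    show ((PySem.List.enumerate svals).foldl (fun d p => d.insert p.2 (p.1 + 1))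
      (PySem.Dict.empty : PySem.Dict Int Int)).items.map (·.1) = svals
    rw [hitems, List.map_map]
    simpa [Function.comp_def] using PySem.List.map_snd_enumerate svals 0
  rw [PySem.Dict.get?_eq_some_iff_mem_items _ _ _ (by rw [hkeys]; exact hnd), hitems]
  simp only [List.mem_map, PySem.List.mem_enumerate_iff]
  constructor
  · rintro ⟨p, ⟨k, hk, rfl⟩, he⟩
    simp only [Prod.mk.injEq] at he
    exact ⟨k, hk, he.1, by omega⟩
  · rintro ⟨k, hk, ha, hm⟩
    exact ⟨((0 : Int) + (k : Int), svals[k]), ⟨k, hk, rfl⟩, by simp [ha]; omega⟩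

-- membership in pvOpsB, for the pos and svals B actually builds
theorem mem_pvOpsB (grid : List (List Int)) (clue_indices : List Int) (n : Nat)
    (o : Nat × Nat × Int) :
    o ∈ pvOpsB
        ((PySem.List.pyRange 0 (n : Int) 1).foldl (fun d r =>
          (PySem.List.pyRange 0 (n : Int) 1).foldl (fun d c =>
            d.modify ((grid.getD r.toNat []).getD c.toNat 0) [] (fun l => l ++ [(r, c)])) d)
          PySem.Dict.empty)
        (PySem.List.sorted (PySem.Set.ofList clue_indices) (fun x => x) false) ↔
      o.1 < n ∧ o.2.1 < n ∧
      ((PySem.List.enumerate (PySem.List.sorted (PySem.Set.ofList clue_indices) (fun x => x) false)).foldl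
          (fun d p => d.insert p.2 (p.1 + 1)) PySem.Dict.empty).get? (pvGet2 grid o.1 o.2.1)
        = some o.2.2 := by
  have hnd : (PySem.List.sorted (PySem.Set.ofList clue_indices) (fun x => x) false).Nodup :=
    (PySem.List.sorted_ofList_pairwise_lt clue_indices).imp (fun h => ne_of_lt h)
  have hposeq :
      (PySem.List.pyRange 0 (n : Int) 1).foldl (fun d r =>
        (PySem.List.pyRange 0 (n : Int) 1).foldl (fun d c =>
          d.modify ((grid.getD r.toNat []).getD c.toNat 0) [] (fun l => l ++ [(r, c)])) d)
        (PySem.Dict.empty : PySem.Dict Int (List (Int × Int)))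
      = ((PySem.List.pyRange 0 (n : Int) 1).flatMap (fun r =>
          (PySem.List.pyRange 0 (n : Int) 1).map (fun c =>
            (((grid.getD r.toNat []).getD c.toNat 0), (r, c))))).foldl
          (fun d p => d.modify p.1 [] (fun l => l ++ [p.2])) PySem.Dict.empty := by
    rw [List.foldl_flatMap]
    congr 1
    funext d r
    rw [List.foldl_map]
  have hpos : ∀ (a : Int) (rc : Int × Int),
      rc ∈ ((PySem.List.pyRange 0 (n : Int) 1).foldl (fun d r =>
        (PySem.List.pyRange 0 (n : Int) 1).foldl (fun d c =>
          d.modify ((grid.getD r.toNat []).getD c.toNat 0) [] (fun l => l ++ [(r, c)])) d)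
        (PySem.Dict.empty : PySem.Dict Int (List (Int × Int)))).getD a []
      ↔ ∃ ri ci : Int, (0 ≤ ri ∧ ri < (n : Int)) ∧ (0 ≤ ci ∧ ci < (n : Int)) ∧
          (grid.getD ri.toNat []).getD ci.toNat 0 = a ∧ rc = (ri, ci) := by
    intro a rc
    rw [hposeq, PySem.Dict.getD_foldl_modify_append, PySem.Dict.getD_empty, List.nil_append]
    constructor
    · intro hmem
      obtain ⟨p, hpf, rfl⟩ := List.mem_map.1 hmem
      obtain ⟨hpc, hpa⟩ := List.mem_filter.1 hpf
      obtain ⟨ri, hri, hpm⟩ := List.mem_flatMap.1 hpc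
      obtain ⟨ci, hci, rfl⟩ := List.mem_map.1 hpm
      rw [PySem.List.mem_pyRange_one] at hri hci
      exact ⟨ri, ci, hri, hci, by simpa using hpa, rfl⟩
    · rintro ⟨ri, ci, hri, hci, ha, rfl⟩
      refine List.mem_map.2 ⟨((grid.getD ri.toNat []).getD ci.toNat 0, (ri, ci)), ?_, rfl⟩
      refine List.mem_filter.2 ⟨?_, by simpa using ha⟩
      exact List.mem_flatMap.2 ⟨ri, PySem.List.mem_pyRange_one.2 hri,
        List.mem_map.2 ⟨ci, PySem.List.mem_pyRange_one.2 hci, rfl⟩⟩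
  unfold pvOpsB
  simp only [List.mem_flatMap, List.mem_map, PySem.List.mem_enumerate_iff]
  constructor
  · rintro ⟨p, ⟨k, hk, rfl⟩, rc, hrc, ho⟩
    obtain ⟨ri, ci, ⟨hri0, hrin⟩, ⟨hci0, hcin⟩, ha, rfl⟩ := (hpos _ rc).1 hrc
    subst ho
    refine ⟨by simp; omega, by simp; omega, ?_⟩
    rw [pvMapping_get? _ hnd]
    exact ⟨k, hk, by simpa [pvGet2] using ha.symm, by simp⟩
  · rintro ⟨h1, h2, h3⟩
    rw [pvMapping_get? _ hnd] at h3
    obtain ⟨k, hk, ha, hm⟩ := h3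
    refine ⟨((0 : Int) + (k : Int),
        (PySem.List.sorted (PySem.Set.ofList clue_indices) (fun x => x) false)[k]),
      ⟨k, hk, rfl⟩, ((o.1 : Int), (o.2.1 : Int)), ?_, ?_⟩
    · rw [hpos]
      exact ⟨(o.1 : Int), (o.2.1 : Int), ⟨by omega, by omega⟩, ⟨by omega, by omega⟩,
        by simpa [pvGet2] using ha.symm, rfl⟩
    · obtain ⟨a, b, w⟩ := o
      simp at hm ⊢
      omega

-- one cell of a write batch whose members are exactly the mapping hits
theorem cell_value (ops : List (Nat × Nat × Int)) (grid : List (List Int))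
    (mapping : PySem.Dict Int Int) (n : Nat) (r c : Nat)
    (hiff : ∀ o, o ∈ ops ↔ o.1 < n ∧ o.2.1 < n ∧ mapping.get? (pvGet2 grid o.1 o.2.1) = some o.2.2)
    (hr : r < n) (hc : c < n) :
    pvGet2 (pvWrites ops (List.replicate n (List.replicate n 0))) r c
      = (mapping.get? (pvGet2 grid r c)).getD 0 := by
  rcases hq : mapping.get? (pvGet2 grid r c) with _ | m
  · rw [Option.getD_none, pvGet2_pvWrites_none]
    · simp [pvGet2, List.getD_eq_getElem?_getD, List.getElem?_replicate, hr, hc]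
    · intro o ho
      rcases (hiff o).1 ho with ⟨_, _, hg⟩
      by_contra hcon
      push_neg at hcon
      rw [hcon.1, hcon.2, hq] at hg
      cases hg
  · rw [Option.getD_some]
    apply pvGet2_pvWrites_mem _ _ _ _ _ ((hiff (r, c, m)).2 ⟨hr, hc, hq⟩)
    · intro o ho e1 e2
      rcases (hiff o).1 ho with ⟨_, _, hg⟩
      rw [e1, e2, hq] at hg
      injection hg with h
      exact h.symm
    · simpa using hr
    · simp only [List.getD_eq_getElem?_getD, List.getElem?_replicate, hr, if_true]
      simpa using hc

theorem pvGet2_eq_getElem (g : List (List Int)) (i j : Nat) (hi : i < g.length)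
    (hj : j < (g[i]'hi).length) : (g[i]'hi)[j]'hj = pvGet2 g i j := by
  unfold pvGet2
  rw [List.getD_eq_getElem _ _ hi, List.getD_eq_getElem _ _ hj]

-- two write batches with the same membership (the mapping hits) fill the zero grid identically
theorem pvWrites_eq_of_mem_iff (grid : List (List Int)) (mapping : PySem.Dict Int Int) (n : Nat)
    (ops1 ops2 : List (Nat × Nat × Int))
    (h1 : ∀ o, o ∈ ops1 ↔ o.1 < n ∧ o.2.1 < n ∧ mapping.get? (pvGet2 grid o.1 o.2.1) = some o.2.2)
    (h2 : ∀ o, o ∈ ops2 ↔ o.1 < n ∧ o.2.1 < n ∧ mapping.get? (pvGet2 grid o.1 o.2.1) = some o.2.2) :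
    pvWrites ops1 (List.replicate n (List.replicate n 0))
      = pvWrites ops2 (List.replicate n (List.replicate n 0)) := by
  have hlen : ∀ ops : List (Nat × Nat × Int),
      (pvWrites ops (List.replicate n (List.replicate n (0 : Int)))).length = n := by
    intro ops; rw [length_pvWrites, List.length_replicate]
  have hrow : ∀ (ops : List (Nat × Nat × Int)) (i : Nat), i < n →
      ((pvWrites ops (List.replicate n (List.replicate n (0 : Int)))).getD i []).length = n := by
    intro ops i hi
    rw [rowlen_pvWrites, List.getD_eq_getElem _ _ (by simpa using hi)]
    simp
  apply List.ext_getElem (by rw [hlen, hlen])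
  intro i hi1 hi2
  have hin : i < n := by rw [hlen] at hi1; exact hi1
  apply List.ext_getElem
  · have e1 : ((pvWrites ops1 (List.replicate n (List.replicate n (0 : Int))))[i]'hi1).length = n := by
      rw [← List.getD_eq_getElem _ ([] : List Int) hi1]; exact hrow _ _ hin
    have e2 : ((pvWrites ops2 (List.replicate n (List.replicate n (0 : Int))))[i]'hi2).length = n := by
      rw [← List.getD_eq_getElem _ ([] : List Int) hi2]; exact hrow _ _ hin
    rw [e1, e2]
  · intro j hj1 hj2
    have e1 : ((pvWrites ops1 (List.replicate n (List.replicate n (0 : Int))))[i]'hi1).length = n := by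
      rw [← List.getD_eq_getElem _ ([] : List Int) hi1]; exact hrow _ _ hin
    have hjn : j < n := e1 ▸ hj1
    rw [pvGet2_eq_getElem _ _ _ hi1 hj1, pvGet2_eq_getElem _ _ _ hi2 hj2,
        cell_value ops1 grid mapping n i j h1 hin hjn,
        cell_value ops2 grid mapping n i j h2 hin hjn]

-- B's state fold, split into its two independent components
theorem B_st_eq (pos : PySem.Dict Int (List (Int × Int))) (svals : List Int)
    (g0 : List (List Int)) :
    (PySem.List.enumerate svals).foldl
      (fun (st : List (List Int) × PySem.Dict Int Int) p =>
        ((pos.getD p.2 []).foldl (fun dg rc => pvSet2d dg rc.1.toNat rc.2.toNat (p.1 + 1)) st.1,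
         st.2.insert p.2 (p.1 + 1)))
      (g0, PySem.Dict.empty)
    = (pvWrites (pvOpsB pos svals) g0,
       (PySem.List.enumerate svals).foldl (fun d p => d.insert p.2 (p.1 + 1)) PySem.Dict.empty) := by
  rw [PySem.List.foldl_prod_mk
      (f := fun dg (p : Int × Int) =>
        (pos.getD p.2 []).foldl (fun dg rc => pvSet2d dg rc.1.toNat rc.2.toNat (p.1 + 1)) dg)
      (g := fun (d : PySem.Dict Int Int) (p : Int × Int) => d.insert p.2 (p.1 + 1))]
  refine Prod.ext ?_ rfl
  show (PySem.List.enumerate svals).foldl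
      (fun dg p => (pos.getD p.2 []).foldl
        (fun dg rc => pvSet2d dg rc.1.toNat rc.2.toNat (p.1 + 1)) dg) g0
    = pvWrites (pvOpsB pos svals) g0
  unfold pvWrites pvOpsB
  rw [List.foldl_flatMap]
  congr 1
  funext dg p
  rw [List.foldl_map]

theorem create_display_grid_py_spec_aux (grid : List (List Int)) (clue_indices : List Int) :
    create_display_grid_py grid clue_indices = create_display_grid_py_alt grid clue_indices := by
  simp only [create_display_grid_py, create_display_grid_py_alt]
  rw [A_display_eq, B_st_eq]
  refine Prod.ext ?_ rfl
  exact pvWrites_eq_of_mem_iff grid _ grid.length _ _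
    (fun o => mem_pvOpsA grid _ grid.length o)
    (fun o => mem_pvOpsB grid clue_indices grid.length o)

-- ===== VERDICT (by name: the statement is the Claim_ definition above) =====
theorem create_display_grid_py_spec : Claim_equal_create_display_grid_py := by
  intro grid clue_indices _ _
  exact create_display_grid_py_spec_aux grid clue_indices
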